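-- pv_equiv track=rewrite | github.com/S4t0r1/Ressurection-MiniGames | sudoku_final4.py | getAllArraysDict
-- ===== SOURCE A (Python) =====
-- def getAllArraysDict(datastr, ilst):
--
--     def getIndxsKey(ilst):
--         return ';'.join(str(i) for i in ilst)
--
--     def getIntRows(datastr, ilst):
--         return {getIndxsKey(ilst[k-9:k]): datastr[k-9:k] for k in range(9, len(datastr)+1, 9)}
--
--     def getIntCols(datastr, ilst):
--         return {getIndxsKey(ilst[k:len(datastr):9]): datastr[k:len(datastr):9] for k in range(9)}
--
--     def getIntSquares(datastr, ilst):
--         itmp = [ilst[k-3:k] for k in range(3, len(datastr)+1, 3)]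
--         newilst = []
--         for j in range(3):
--             for tripl in itmp[j:(len(datastr)//3):3]:
--                 for e in tripl:
--                     newilst.append(e)
--         return {getIndxsKey(newilst[k-9:k]): ''.join(datastr[i] for i in newilst[k-9:k]) for k in range(9, len(datastr)+1, 9)}
--
--     return {**getIntRows(datastr, ilst), **getIntCols(datastr, ilst), **getIntSquares(datastr, ilst)}
-- ===== SOURCE B (Python) =====
-- def getAllArraysDict(datastr, ilst):
--     L = len(datastr)
--     m = len(ilst)
--     res = {}
--     # single pass over cells: accumulate the current row and the 9 column buffers,
--     # emitting a row entry each time a 9-chunk completes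
--     rowk = []
--     rowv = []
--     colk = [[] for _ in range(9)]
--     colv = [[] for _ in range(9)]
--     for p in range(L):
--         if p < m:
--             rowk.append(str(ilst[p]))
--             colk[p % 9].append(str(ilst[p]))
--         rowv.append(datastr[p])
--         colv[p % 9].append(datastr[p])
--         if p % 9 == 8:
--             res[';'.join(rowk)] = ''.join(rowv)
--             rowk = []
--             rowv = []
--     for c in range(9):
--         res[';'.join(colk[c])] = ''.join(colv[c])
--     # squares: one pass over triples, distributing each into its band bucket
--     bands = [[], [], []]
--     for t in range(L // 3):
--         bands[t % 3].extend(ilst[3 * t:3 * t + 3])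
--     vals = bands[0] + bands[1] + bands[2]
--     for b in range(L // 9):
--         chunk = vals[9 * b:9 * b + 9]
--         res[';'.join(str(v) for v in chunk)] = ''.join(datastr[v] for v in chunk)
--     return res
-- ===== Notes on version B (the rewrite author's own statement) =====
-- stated objective: alternative
-- what changed: B builds one dict incrementally instead of merging three slice-comprehension dicts: a single pass over the cells with row/column accumulators (each row entry emitted when its 9-chunk completes) replaces the row and column slicing passes, and one bucket-distribution pass over the triples (extend bands[t % 3]) replaces A's triple-slice band-gathering reshuffle.
import Mathlib
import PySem

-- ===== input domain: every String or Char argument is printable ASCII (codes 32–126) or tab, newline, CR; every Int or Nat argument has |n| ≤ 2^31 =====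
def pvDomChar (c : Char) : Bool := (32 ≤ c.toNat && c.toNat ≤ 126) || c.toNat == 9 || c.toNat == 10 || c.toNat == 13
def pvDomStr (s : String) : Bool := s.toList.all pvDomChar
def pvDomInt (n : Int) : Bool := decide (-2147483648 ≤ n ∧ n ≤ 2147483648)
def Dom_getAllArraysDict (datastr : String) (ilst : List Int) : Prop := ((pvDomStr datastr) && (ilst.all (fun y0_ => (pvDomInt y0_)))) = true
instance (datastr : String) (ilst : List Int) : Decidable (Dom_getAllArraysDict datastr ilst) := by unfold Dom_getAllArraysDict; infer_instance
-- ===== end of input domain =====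

-- B replaces A's three staged slice-comprehension dicts and {**...} merge by one incremental
-- dict: a single pass over the cells with row/column accumulators (emitting each row chunk as
-- it completes) and a single bucket-distribution pass over the triples for the square
-- reordering (objective: alternative decomposition, same cost).

-- ===== PORT A =====
-- ';'.join(str(i) for i in l)
def pvKey (l : List Int) : String :=
  String.ofList (PySem.Chars.join [';'] (l.map PySem.Int.toChars))

-- getIntRows(datastr, ilst)  (datastr passed as its character list)
def pvRowsA (cs : List Char) (ilst : List Int) : PySem.Dict String String :=
  (PySem.List.pyRange 9 ((cs.length : Int) + 1) 9).foldl
    (fun d k => d.insert (pvKey (PySem.List.slice ilst (some (k - 9)) (some k)))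
                         (String.ofList (PySem.List.slice cs (some (k - 9)) (some k))))
    PySem.Dict.empty

-- getIntCols(datastr, ilst)
def pvColsA (cs : List Char) (ilst : List Int) : PySem.Dict String String :=
  (PySem.List.pyRange 0 9 1).foldl
    (fun d k => d.insert (pvKey ((PySem.List.slice? ilst (some k) (some (cs.length : Int)) 9).getD []))
                         (String.ofList ((PySem.List.slice? cs (some k) (some (cs.length : Int)) 9).getD [])))
    PySem.Dict.empty

-- getIntSquares(datastr, ilst); datastr[i] (i may be negative, NEGATIVE WRAPS) is pyGetD;
-- the default '?' is never reached on Pre_ (all indices in range there)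
-- itmp = [ilst[k-3:k] for k in range(3, len(datastr)+1, 3)]
def pvItmpA (cs : List Char) (ilst : List Int) : List (List Int) :=
  (PySem.List.pyRange 3 ((cs.length : Int) + 1) 3).map
    (fun k => PySem.List.slice ilst (some (k - 3)) (some k))

-- newilst built by the j / tripl / e triple loop
def pvNewilstA (cs : List Char) (ilst : List Int) : List Int :=
  (PySem.List.pyRange 0 3 1).foldl
    (fun acc j =>
      ((PySem.List.slice? (pvItmpA cs ilst) (some j)
          (some (PySem.Int.floordiv (cs.length : Int) 3)) 3).getD []).foldl
        (fun acc2 tripl => tripl.foldl (fun a e => a ++ [e]) acc2) acc) []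

def pvSquaresA (cs : List Char) (ilst : List Int) : PySem.Dict String String :=
  (PySem.List.pyRange 9 ((cs.length : Int) + 1) 9).foldl
    (fun d k => d.insert (pvKey (PySem.List.slice (pvNewilstA cs ilst) (some (k - 9)) (some k)))
        (String.ofList ((PySem.List.slice (pvNewilstA cs ilst) (some (k - 9)) (some k)).map
          (fun i => PySem.List.pyGetD cs i '?'))))
    PySem.Dict.empty

-- {**rows, **cols, **squares}
def getAllArraysDict (datastr : String) (ilst : List Int) : List (String × String) :=
  (((PySem.Dict.empty.update (pvRowsA datastr.toList ilst).items).update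
      (pvColsA datastr.toList ilst).items).update (pvSquaresA datastr.toList ilst).items).items

-- ===== PORT B =====
-- the state of Source B's single pass over the cells: the dict being filled, the pending row
-- key/value buffers, and the 9 column key/value buffers
structure pvSt where
  d : PySem.Dict String String
  rowk : List (List Char)
  rowv : List Char
  colk : List (List (List Char))
  colv : List (List Char)

-- loop body of 'for p in range(L)': p ≥ 0 here, so p % 9 is (mod p 9).toNat exactly;
-- datastr[p] is always in range, the '?' default is dead
def pvStepB (cs : List Char) (ilst : List Int) (st : pvSt) (p : Int) : pvSt :=
  let st1 := if p < (ilst.length : Int) then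
      pvSt.mk st.d
        (st.rowk ++ [PySem.Int.toChars (PySem.List.pyGetD ilst p 0)])
        st.rowv
        (st.colk.set (PySem.Int.mod p 9).toNat
          (st.colk.getD (PySem.Int.mod p 9).toNat [] ++ [PySem.Int.toChars (PySem.List.pyGetD ilst p 0)]))
        st.colv
    else st
  let st2 := pvSt.mk st1.d st1.rowk (st1.rowv ++ [PySem.List.pyGetD cs p '?']) st1.colk
      (st1.colv.set (PySem.Int.mod p 9).toNat
        (st1.colv.getD (PySem.Int.mod p 9).toNat [] ++ [PySem.List.pyGetD cs p '?']))
  if PySem.Int.mod p 9 = 8 then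
    pvSt.mk (st2.d.insert (String.ofList (PySem.Chars.join [';'] st2.rowk)) (String.ofList st2.rowv))
      [] [] st2.colk st2.colv
  else st2

def pvPassB (cs : List Char) (ilst : List Int) : pvSt :=
  (PySem.List.pyRange 0 (cs.length : Int) 1).foldl (pvStepB cs ilst)
    (pvSt.mk PySem.Dict.empty [] [] [[], [], [], [], [], [], [], [], []] [[], [], [], [], [], [], [], [], []])

-- for c in range(9): res[';'.join(colk[c])] = ''.join(colv[c])
def pvColsOutB (st : pvSt) : PySem.Dict String String :=
  (PySem.List.pyRange 0 9 1).foldl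
    (fun d c => d.insert (String.ofList (PySem.Chars.join [';'] (st.colk.getD c.toNat [])))
                         (String.ofList (st.colv.getD c.toNat []))) st.d

-- bands: one pass over the triples, each extended onto bucket t % 3
def pvBandsB (cs : List Char) (ilst : List Int) : List (List Int) :=
  (PySem.List.pyRange 0 (PySem.Int.floordiv (cs.length : Int) 3) 1).foldl
    (fun bs t => bs.set (PySem.Int.mod t 3).toNat
      (bs.getD (PySem.Int.mod t 3).toNat [] ++ PySem.List.slice ilst (some (3*t)) (some (3*t+3))))
    [[], [], []]

def pvValsB (cs : List Char) (ilst : List Int) : List Int :=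
  (pvBandsB cs ilst).getD 0 [] ++ (pvBandsB cs ilst).getD 1 [] ++ (pvBandsB cs ilst).getD 2 []

-- for b in range(L // 9): chunk = vals[9b:9b+9]; res[';'.join…] = ''.join(datastr[v] …)
def pvSqB (cs : List Char) (ilst : List Int) (d : PySem.Dict String String) : PySem.Dict String String :=
  (PySem.List.pyRange 0 (PySem.Int.floordiv (cs.length : Int) 9) 1).foldl
    (fun d b =>
      d.insert (String.ofList (PySem.Chars.join [';']
          ((PySem.List.slice (pvValsB cs ilst) (some (9*b)) (some (9*b+9))).map PySem.Int.toChars)))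
        (String.ofList ((PySem.List.slice (pvValsB cs ilst) (some (9*b)) (some (9*b+9))).map
          (fun v => PySem.List.pyGetD cs v '?')))) d

def getAllArraysDict_alt (datastr : String) (ilst : List Int) : List (String × String) :=
  (pvSqB datastr.toList ilst (pvColsOutB (pvPassB datastr.toList ilst))).items

-- ===== PRECONDITION & SPEC =====
-- the ilst entries A actually uses as datastr indices: the square reordering of the triples,
-- truncated to the complete 9-chunks
def pvUsed (datastr : String) (ilst : List Int) : List Int :=
  ((List.range 3).flatMap (fun j =>
    (List.range ((datastr.toList.length / 3 - j + 2) / 3)).flatMap (fun k =>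
      (ilst.drop (3 * (j + 3 * k))).take 3))).take (9 * (datastr.toList.length / 9))

-- Pre_ excludes exactly the inputs on which A raises IndexError: some ilst entry consumed by a
-- complete 9-chunk of the square reordering lies outside [-len(datastr), len(datastr)).
def Pre_getAllArraysDict (datastr : String) (ilst : List Int) : Prop :=
  ∀ i ∈ pvUsed datastr ilst,
    -(datastr.toList.length : Int) ≤ i ∧ i < (datastr.toList.length : Int)
instance (datastr : String) (ilst : List Int) : Decidable (Pre_getAllArraysDict datastr ilst) := by
  unfold Pre_getAllArraysDict; infer_instance

def pvWitness_getAllArraysDict : String × List Int :=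
  ("123456789", [0, 1, 2, 3, 4, 5, 6, 7, 8])

def Spec_getAllArraysDict (datastr : String) (ilst : List Int) (out : List (String × String)) : Prop :=
  out = getAllArraysDict_alt datastr ilst
instance (datastr : String) (ilst : List Int) (out : List (String × String)) :
    Decidable (Spec_getAllArraysDict datastr ilst out) := by
  unfold Spec_getAllArraysDict; infer_instance

-- ===== CLAIM (what is proved, stated in full; the proofs are below) =====
def Claim_equal_getAllArraysDict : Prop := ∀ (datastr : String) (ilst : List Int),
  Dom_getAllArraysDict datastr ilst → Pre_getAllArraysDict datastr ilst →
    Spec_getAllArraysDict datastr ilst (getAllArraysDict datastr ilst)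

-- ===== LEMMAS AND PROOFS =====

-- ---- generic dict facts about merging a built dict's items (A's {**…}) vs raw inserts (B) ----
theorem pv_insert_comm {ν : Type} (d : PySem.Dict String ν) (k q : String) (v w : ν)
    (hk : d.contains k = true) (hne : q ≠ k) :
    (d.insert q w).insert k v = (d.insert k v).insert q w := by
  apply PySem.Dict.ext
  by_cases hq : d.contains q = true
  · rw [PySem.Dict.items_insert_of_contains _ v (by rw [PySem.Dict.contains_insert]; simp [hk]),
        PySem.Dict.items_insert_of_contains _ w hq,
        PySem.Dict.items_insert_of_contains _ w (by rw [PySem.Dict.contains_insert]; simp [hq]),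
        PySem.Dict.items_insert_of_contains _ v hk,
        List.map_map, List.map_map]
    apply List.map_congr_left
    intro p _
    simp only [Function.comp_apply]
    by_cases h1 : p.1 = q
    · simp [h1, hne]
    · by_cases h2 : p.1 = k
      · simp [h2, Ne.symm hne]
      · simp [h1, h2]
  · have hq' : (d.insert k v).contains q = false := by
      rw [PySem.Dict.contains_insert]; simp [hne, hq]
    rw [PySem.Dict.items_insert_of_contains _ v (by rw [PySem.Dict.contains_insert]; simp [hk]),
        PySem.Dict.items_insert_of_not_contains _ w (by simpa using hq),
        PySem.Dict.items_insert_of_not_contains _ w hq',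
        PySem.Dict.items_insert_of_contains _ v hk,
        List.map_append]
    simp [hne]

theorem pv_update_insert {ν : Type} (d : PySem.Dict String ν) (k : String) (v : ν)
    (t : List (String × ν)) (hk : d.contains k = true) (ht : ∀ p ∈ t, p.1 ≠ k) :
    (d.update t).insert k v = (d.insert k v).update t := by
  induction t generalizing d with
  | nil => rfl
  | cons p t ih =>
    simp only [PySem.Dict.update, List.foldl_cons] at *
    rw [ih (d.insert p.1 p.2) (by rw [PySem.Dict.contains_insert]; simp [hk])
        (fun q hq => ht q (by simp [hq])),
        pv_insert_comm d k p.1 v p.2 hk (ht p (by simp))]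

theorem pv_update_map_replace {ν : Type} (d : PySem.Dict String ν) (k : String) (v : ν)
    (l : List (String × ν)) (hnd : (l.map Prod.fst).Nodup) (hmem : k ∈ l.map Prod.fst) :
    d.update (l.map (fun p => if p.1 == k then (k, v) else p)) = (d.update l).insert k v := by
  induction l generalizing d with
  | nil => simp at hmem
  | cons p t ih =>
    by_cases hp : p.1 = k
    · have hkt : ∀ q ∈ t.map Prod.fst, q ≠ k := by
        intro q hq
        simp only [List.map_cons, List.nodup_cons] at hnd
        rintro rfl
        exact hnd.1 (hp ▸ hq)
      have hmap : t.map (fun p => if p.1 == k then (k, v) else p) = t := by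
        rw [List.map_congr_left (g := id) ?_, List.map_id]
        intro q hq
        have : q.1 ≠ k := hkt q.1 (List.mem_map_of_mem hq)
        simp [this]
      simp only [List.map_cons, hp, beq_self_eq_true, if_pos, hmap]
      simp only [PySem.Dict.update, List.foldl_cons]
      rw [hp]
      have h5 := pv_update_insert (d.insert k p.2) k v t (PySem.Dict.contains_insert_self d k p.2)
            (fun q hq => hkt q.1 (List.mem_map_of_mem hq))
      rw [PySem.Dict.insert_insert_self] at h5
      exact h5.symm
    · have hmem' : k ∈ t.map Prod.fst := by
        simp only [List.map_cons, List.mem_cons] at hmem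
        exact hmem.resolve_left (fun h => hp h.symm)
      simp only [List.map_cons, PySem.Dict.update, List.foldl_cons]
      have hif : (if p.1 == k then (k, v) else p) = p := by simp [hp]
      rw [hif]
      exact ih (d.insert p.1 p.2) (by simpa using (List.nodup_cons.mp (by simpa using hnd)).2) hmem'

theorem pv_update_items_insert {ν : Type} (d e : PySem.Dict String ν) (k : String) (v : ν)
    (hnd : e.keys.Nodup) :
    d.update (e.insert k v).items = (d.update e.items).insert k v := by
  by_cases hc : e.contains k = true
  · rw [PySem.Dict.items_insert_of_contains _ v hc]
    exact pv_update_map_replace d k v e.items hnd ((PySem.Dict.contains_iff_mem_keys e k).mp hc)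
  · rw [PySem.Dict.items_insert_of_not_contains _ v (by simpa using hc)]
    simp [PySem.Dict.update, List.foldl_append]

theorem pv_update_items_update {ν : Type} (ps : List (String × ν)) (d e : PySem.Dict String ν)
    (hnd : e.keys.Nodup) :
    d.update (e.update ps).items = (d.update e.items).update ps := by
  induction ps generalizing e with
  | nil => rfl
  | cons p ps ih =>
    show d.update ((e.insert p.1 p.2).update ps).items
        = ((d.update e.items).insert p.1 p.2).update ps
    rw [ih (e.insert p.1 p.2) (PySem.Dict.nodup_keys_insert e p.1 p.2 hnd),
        pv_update_items_insert d e p.1 p.2 hnd]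

theorem pv_update_built {ν : Type} (d : PySem.Dict String ν) (ps : List (String × ν)) :
    d.update ((PySem.Dict.empty.update ps).items) = d.update ps := by
  rw [pv_update_items_update ps d PySem.Dict.empty PySem.Dict.nodup_keys_empty]
  rfl

-- ---- ranges and slices in canonical (List.range).map form ----
theorem pv_rangeNat (a b s : Nat) (hs : 0 < s) :
    PySem.List.pyRange (a : Int) (b : Int) (s : Int) =
      (List.range ((b - a + (s - 1)) / s)).map (fun k => ((a + s * k : Nat) : Int)) := by
  rw [PySem.List.pyRange_of_pos _ _ (by exact_mod_cast hs)]
  have hc : (if (a:Int) < (b:Int) then (((b:Int) - (a:Int) + (s:Int) - 1)/(s:Int)).toNat else 0)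
      = (b - a + (s - 1)) / s := by
    split_ifs with h
    · have h1 : ((b:Int) - (a:Int) + (s:Int) - 1) = ((b - a + (s-1) : Nat) : Int) := by
        have : a < b := by exact_mod_cast h
        push_cast; omega
      rw [h1, ← Int.natCast_ediv, Int.toNat_natCast]
    · have hba : b ≤ a := by
        have := not_lt.mp h; exact_mod_cast this
      have : b - a + (s - 1) = s - 1 := by omega
      rw [this, Nat.div_eq_of_lt (by omega)]
  rw [hc]
  apply List.map_congr_left
  intro k _
  push_cast; ring

theorem pv_filterMap_eq_map {α β : Type} (l : List α) (h : α → Option β) (g : α → β)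
    (hp : ∀ x ∈ l, h x = some (g x)) : l.filterMap h = l.map g := by
  induction l with
  | nil => rfl
  | cons x t ih =>
    rw [List.filterMap_cons, hp x (by simp), List.map_cons, ih (fun y hy => hp y (by simp [hy]))]

theorem pv_sliceIdx {α : Type} (xs : List α) (a b s : Nat) (hs : 0 < s) :
    PySem.List.sliceIndices xs.length (some (a:Int)) (some (b:Int)) (s:Int) =
      (((min a xs.length : Nat) : Int), ((min b xs.length : Nat) : Int), (s:Int)) := by
  unfold PySem.List.sliceIndices
  have h1 : ¬((s:Int) < 0) := by omega
  have h2 : ¬((a:Int) < 0) := by omega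
  have h3 : ¬((b:Int) < 0) := by omega
  simp only [if_neg h1, if_neg h2, if_neg h3]
  rw [Prod.mk.injEq, Prod.mk.injEq]
  refine ⟨by push_cast; ring, by push_cast; ring, rfl⟩

theorem pv_sliceStep {α : Type} (xs : List α) (a b s : Nat) (hs : 0 < s) (d : α) :
    (PySem.List.slice? xs (some (a : Int)) (some (b : Int)) (s : Int)).getD [] =
      (List.range ((min b xs.length - a + (s - 1)) / s)).map (fun k => xs.getD (a + s * k) d) := by
  have hsne : (s:Int) ≠ 0 := by omega
  unfold PySem.List.slice?
  rw [if_neg hsne, pv_sliceIdx xs a b s hs]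
  simp only [Option.getD_some]
  have hpos : (0:Int) < (s:Int) := by omega
  rw [if_pos hpos]
  by_cases hlt : ((min a xs.length : Nat) : Int) < ((min b xs.length : Nat) : Int)
  · rw [if_pos hlt]
    have hab : min a xs.length < min b xs.length := by exact_mod_cast hlt
    have ha : a ≤ xs.length := by omega
    have hma : min a xs.length = a := by omega
    have hcnt : ((((min b xs.length : Nat):Int) - ((min a xs.length : Nat):Int) + (s:Int) - 1)/(s:Int)).toNat
        = (min b xs.length - a + (s - 1)) / s := by
      have h1 : (((min b xs.length : Nat):Int) - ((min a xs.length : Nat):Int) + (s:Int) - 1)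
          = ((min b xs.length - a + (s-1) : Nat) : Int) := by push_cast; omega
      rw [h1, ← Int.natCast_ediv, Int.toNat_natCast]
    rw [hcnt]
    apply pv_filterMap_eq_map
    intro k hk
    have hk' : k < (min b xs.length - a + (s - 1)) / s := by simpa using hk
    have hkin : a + s * k < min b xs.length := by
      have h2 := (Nat.le_div_iff_mul_le hs).mp hk'
      have h3 : k.succ * s = s * k + s := by rw [Nat.succ_mul]; ring
      omega
    have hidx : (((min a xs.length : Nat):Int) + (s:Int) * (k:Int)).toNat = a + s * k := by
      rw [hma]; omega
    rw [hidx, List.getElem?_eq_getElem (by omega), List.getD_eq_getElem xs d (by omega)]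
  · rw [if_neg hlt]
    have hab : ¬ (min a xs.length < min b xs.length) := by exact_mod_cast hlt
    have : (min b xs.length - a + (s - 1)) / s = 0 := by
      apply Nat.div_eq_of_lt; omega
    rw [this]
    simp

-- ---- the canonical pair lists both programs produce ----
def pvRowEntry (cs : List Char) (ilst : List Int) (r : Nat) : String × String :=
  (pvKey ((ilst.drop (9*r)).take 9), String.ofList ((cs.drop (9*r)).take 9))

def pvRowPairs (cs : List Char) (ilst : List Int) : List (String × String) :=
  (List.range (cs.length / 9)).map (pvRowEntry cs ilst)

def pvColPairs (cs : List Char) (ilst : List Int) : List (String × String) :=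
  (List.range 9).map (fun c =>
    (pvKey ((List.range ((min cs.length ilst.length - c + 8) / 9)).map
        (fun k => ilst.getD (c + 9*k) 0)),
     String.ofList ((List.range ((cs.length - c + 8) / 9)).map (fun k => cs.getD (c + 9*k) '?'))))

def pvBand (ilst : List Int) (j n : Nat) : List Int :=
  (List.range ((n - j + 2) / 3)).flatMap (fun k => (ilst.drop (3*(j + 3*k))).take 3)

def pvVals (cs : List Char) (ilst : List Int) : List Int :=
  (List.range 3).flatMap (fun j => pvBand ilst j (cs.length / 3))

def pvSqPairs (cs : List Char) (ilst : List Int) : List (String × String) :=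
  (List.range (cs.length / 9)).map (fun b =>
    (pvKey (((pvVals cs ilst).drop (9*b)).take 9),
     String.ofList ((((pvVals cs ilst).drop (9*b)).take 9).map (fun i => PySem.List.pyGetD cs i '?'))))

-- ---- A's passes equal updates by the canonical pair lists ----
theorem pv_rowsA_eq (cs : List Char) (ilst : List Int) :
    pvRowsA cs ilst = PySem.Dict.empty.update (pvRowPairs cs ilst) := by
  unfold pvRowsA pvRowPairs pvRowEntry
  have hcnt : (cs.length + 1 - 9 + (9 - 1)) / 9 = cs.length / 9 := by omega
  have h9 : PySem.List.pyRange 9 ((cs.length : Int) + 1) 9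
      = (List.range (cs.length / 9)).map (fun i => ((9 + 9 * i : Nat) : Int)) := by
    have h := pv_rangeNat 9 (cs.length + 1) 9 (by norm_num)
    rw [hcnt] at h
    simpa using h
  rw [h9]
  simp only [PySem.Dict.update]
  rw [List.foldl_map, List.foldl_map]
  apply PySem.List.foldl_congr_mem
  intro d i hi
  have e1 : ((9 + 9 * i : Nat) : Int) - 9 = ((9 * i : Nat) : Int) := by push_cast; ring
  rw [e1, PySem.List.slice_natCast, PySem.List.slice_natCast]
  have e2 : 9 + 9 * i - 9 * i = 9 := by omega
  rw [e2]

theorem pv_colsA_eq (cs : List Char) (ilst : List Int) :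
    pvColsA cs ilst = PySem.Dict.empty.update (pvColPairs cs ilst) := by
  unfold pvColsA pvColPairs pvKey
  have h09 : PySem.List.pyRange 0 9 1 = (List.range 9).map (fun i => ((i : Nat) : Int)) := by decide
  rw [h09]
  simp only [PySem.Dict.update]
  rw [List.foldl_map, List.foldl_map]
  apply PySem.List.foldl_congr_mem
  intro d c hc
  have hss := pv_sliceStep ilst c cs.length 9 (by norm_num) 0
  have hsv := pv_sliceStep cs c cs.length 9 (by norm_num) '?'
  simp only [Nat.cast_ofNat, Nat.min_self, show (9:Nat) - 1 = 8 from rfl] at hss hsv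
  rw [hss, hsv]

theorem pv_itmpA_eq (cs : List Char) (ilst : List Int) :
    pvItmpA cs ilst = (List.range (cs.length / 3)).map (fun t => (ilst.drop (3*t)).take 3) := by
  unfold pvItmpA
  have hcnt : (cs.length + 1 - 3 + (3 - 1)) / 3 = cs.length / 3 := by omega
  have h3 : PySem.List.pyRange 3 ((cs.length : Int) + 1) 3
      = (List.range (cs.length / 3)).map (fun i => ((3 + 3 * i : Nat) : Int)) := by
    have h := pv_rangeNat 3 (cs.length + 1) 3 (by norm_num)
    rw [hcnt] at h
    simpa using h
  rw [h3, List.map_map]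
  apply List.map_congr_left
  intro t ht
  simp only [Function.comp_apply]
  have e1 : ((3 + 3 * t : Nat) : Int) - 3 = ((3 * t : Nat) : Int) := by push_cast; ring
  rw [e1, PySem.List.slice_natCast]
  have e2 : 3 + 3 * t - 3 * t = 3 := by omega
  rw [e2]

theorem pv_newilstA_eq (cs : List Char) (ilst : List Int) :
    pvNewilstA cs ilst = pvVals cs ilst := by
  unfold pvNewilstA pvVals pvBand
  have h03 : PySem.List.pyRange 0 3 1 = (List.range 3).map (fun i => ((i : Nat) : Int)) := by decide
  have hf3 : PySem.Int.floordiv (cs.length : Int) 3 = ((cs.length / 3 : Nat) : Int) := by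
    exact_mod_cast PySem.Int.floordiv_natCast cs.length 3
  rw [h03, hf3, List.foldl_map]
  rw [PySem.List.foldl_congr_mem _ _
      (fun acc j => acc ++ (List.range ((cs.length / 3 - j + 2) / 3)).flatMap
        (fun k => (ilst.drop (3*(j + 3*k))).take 3)) [] ?_]
  · rw [PySem.List.foldl_append_eq_flatMap]
    simp
  · intro acc j hj
    have hss := pv_sliceStep (pvItmpA cs ilst) j (cs.length / 3) 3 (by norm_num) ([] : List Int)
    have hlen : (pvItmpA cs ilst).length = cs.length / 3 := by
      rw [pv_itmpA_eq]; simp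
    rw [hlen, Nat.min_self] at hss
    simp only [Nat.cast_ofNat, show (3:Nat) - 1 = 2 from rfl] at hss
    rw [hss]
    have hmap : (List.range ((cs.length / 3 - j + 2) / 3)).map
          (fun k => (pvItmpA cs ilst).getD (j + 3 * k) [])
        = (List.range ((cs.length / 3 - j + 2) / 3)).map
          (fun k => (ilst.drop (3*(j + 3*k))).take 3) := by
      apply List.map_congr_left
      intro k hk
      have hk' : k < (cs.length / 3 - j + 2) / 3 := by simpa using hk
      have hidx : j + 3 * k < cs.length / 3 := by omega
      rw [pv_itmpA_eq, List.getD_eq_getElem _ _ (by simpa using hidx)]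
      simp
    rw [hmap, PySem.List.foldl_congr_mem _ _ (fun acc2 tripl => acc2 ++ tripl) acc ?_]
    · rw [List.foldl_map, PySem.List.foldl_append_eq_flatMap]
    · intro acc2 tripl _
      exact PySem.List.foldl_append_singleton tripl acc2

theorem pv_squaresA_eq (cs : List Char) (ilst : List Int) :
    pvSquaresA cs ilst = PySem.Dict.empty.update (pvSqPairs cs ilst) := by
  unfold pvSquaresA pvSqPairs
  rw [pv_newilstA_eq]
  have hcnt : (cs.length + 1 - 9 + (9 - 1)) / 9 = cs.length / 9 := by omega
  have h9 : PySem.List.pyRange 9 ((cs.length : Int) + 1) 9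
      = (List.range (cs.length / 9)).map (fun i => ((9 + 9 * i : Nat) : Int)) := by
    have h := pv_rangeNat 9 (cs.length + 1) 9 (by norm_num)
    rw [hcnt] at h
    simpa using h
  rw [h9]
  simp only [PySem.Dict.update]
  rw [List.foldl_map, List.foldl_map]
  apply PySem.List.foldl_congr_mem
  intro d i hi
  have e1 : ((9 + 9 * i : Nat) : Int) - 9 = ((9 * i : Nat) : Int) := by push_cast; ring
  rw [e1, PySem.List.slice_natCast]
  have e2 : 9 + 9 * i - 9 * i = 9 := by omega
  rw [e2]

-- ---- B-side: the single pass equals a canonical state ----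
def pvStN (cs : List Char) (ilst : List Int) (n : Nat) : pvSt :=
  pvSt.mk
    (PySem.Dict.empty.update ((List.range (n / 9)).map (pvRowEntry cs ilst)))
    (((ilst.drop (9*(n/9))).take (n - 9*(n/9))).map PySem.Int.toChars)
    ((cs.drop (9*(n/9))).take (n - 9*(n/9)))
    ((List.range 9).map (fun c => ((List.range ((min n ilst.length - c + 8)/9)).map
        (fun k => ilst.getD (c + 9*k) 0)).map PySem.Int.toChars))
    ((List.range 9).map (fun c => (List.range ((n - c + 8)/9)).map (fun k => cs.getD (c + 9*k) '?')))

theorem pv_getD_map_range {α : Type} (N : Nat) (F : Nat → α) (d : α) (c : Nat) (hc : c < N) :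
    ((List.range N).map F).getD c d = F c := by
  rw [List.getD_eq_getElem _ _ (by simpa using hc)]
  simp

theorem pv_set_map_range {α : Type} (N : Nat) (F : Nat → α) (c0 : Nat) (y : α) :
    ((List.range N).map F).set c0 y = (List.range N).map (fun c => if c = c0 then y else F c) := by
  apply List.ext_getElem (by simp)
  intro i h1 h2
  simp only [List.getElem_set, List.getElem_map, List.getElem_range]
  split_ifs with h h' h'
  · rfl
  · exact absurd h.symm h'
  · exact absurd h'.symm h
  · rfl

theorem pv_take_snoc {α : Type} (l : List α) (a k : Nat) (d : α) (h : a + k < l.length) :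
    (l.drop a).take k ++ [l.getD (a+k) d] = (l.drop a).take (k+1) := by
  rw [List.take_succ]
  congr 1
  rw [List.getElem?_drop, List.getD_eq_getElem l d h, List.getElem?_eq_getElem h]
  rfl

theorem pv_chunk_snoc {α : Type} (l : List α) (a n : Nat) (d : α) (ha : a ≤ n) (h : n < l.length) :
    (l.drop a).take (n - a) ++ [l.getD n d] = (l.drop a).take (n + 1 - a) := by
  have e : a + (n - a) = n := by omega
  have := pv_take_snoc l a (n - a) d (by omega)
  rw [e] at this
  rw [this]
  congr 1
  omega

theorem pv_chunk_stall {α : Type} (l : List α) (a n : Nat) (h : l.length ≤ n) :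
    (l.drop a).take (n - a) = (l.drop a).take (n + 1 - a) := by
  rw [List.take_of_length_le (by simp; omega), List.take_of_length_le (by simp; omega)]

theorem pv_col_advance {α : Type} (l : List α) (n c0 : Nat) (d : α) (hc : c0 = n % 9) :
    (List.range ((n - c0 + 8)/9)).map (fun k => l.getD (c0 + 9*k) d) ++ [l.getD n d]
      = (List.range ((n + 1 - c0 + 8)/9)).map (fun k => l.getD (c0 + 9*k) d) := by
  have e1 : (n + 1 - c0 + 8)/9 = (n - c0 + 8)/9 + 1 := by omega
  have e2 : c0 + 9 * ((n - c0 + 8)/9) = n := by omega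
  rw [e1, List.range_succ, List.map_append, List.map_singleton, e2]

theorem pv_col_skip (n c c0 m : Nat) (hc : c0 = n % 9) (hc9 : c < 9) (hne : c ≠ c0) (hnm : n < m) :
    (min (n+1) m - c + 8)/9 = (min n m - c + 8)/9 := by
  omega

theorem pv_update_append_singleton {ν : Type} (d : PySem.Dict String ν)
    (ps : List (String × ν)) (e : String × ν) :
    d.update (ps ++ [e]) = (d.update ps).insert e.1 e.2 := by
  simp [PySem.Dict.update, List.foldl_append]

theorem pv_range0 (N : Nat) :
    PySem.List.pyRange 0 ((N : Nat) : Int) 1 = (List.range N).map (fun i => ((i : Nat) : Int)) := by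
  have h := pv_rangeNat 0 N 1 (by norm_num)
  have hc : (N - 0 + (1 - 1)) / 1 = N := by omega
  rw [hc] at h
  simpa using h

-- one step of the pass advances the canonical state
theorem pv_stepB_succ (cs : List Char) (ilst : List Int) (n : Nat) (hn : n < cs.length) :
    pvStepB cs ilst (pvStN cs ilst n) ((n : Nat) : Int) = pvStN cs ilst (n + 1) := by
  have hm9 : PySem.Int.mod ((n : Nat) : Int) 9 = ((n % 9 : Nat) : Int) := by
    exact_mod_cast PySem.Int.mod_natCast n 9
  have hc9 : n % 9 < 9 := by omega
  have hq : 9 * (n / 9) ≤ n := by omega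
  unfold pvStepB
  rw [hm9]
  simp only [pvStN, Int.toNat_natCast, PySem.List.pyGetD_natCast]
  split_ifs with h8 hm hm
  · -- n < len(ilst), row chunk completes
    dsimp only
    have hm' : n < ilst.length := by exact_mod_cast hm
    have h8' : n % 9 = 8 := by exact_mod_cast h8
    congr 1
    · -- d
      rw [show (n+1)/9 = n/9 + 1 from by omega, List.range_succ, List.map_append,
          List.map_singleton, pv_update_append_singleton]
      have hK : (ilst.drop (9*(n/9))).take (n - 9*(n/9)) ++ [ilst.getD n 0]
          = (ilst.drop (9*(n/9))).take 9 := by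
        rw [pv_chunk_snoc ilst (9*(n/9)) n 0 hq hm']
        congr 1
        omega
      have hV : (cs.drop (9*(n/9))).take (n - 9*(n/9)) ++ [cs.getD n '?']
          = (cs.drop (9*(n/9))).take 9 := by
        rw [pv_chunk_snoc cs (9*(n/9)) n '?' hq hn]
        congr 1
        omega
      congr 1
      · simp only [pvRowEntry, pvKey]
        rw [show [PySem.Int.toChars (ilst.getD n 0)] = [ilst.getD n 0].map PySem.Int.toChars
              from rfl, ← List.map_append, hK]
      · simp only [pvRowEntry]
        rw [hV]
    · -- rowk resets
      rw [show 9*((n+1)/9) = n+1 from by omega]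
      simp
    · -- rowv resets
      rw [show 9*((n+1)/9) = n+1 from by omega]
      simp
    · -- colk
      rw [pv_getD_map_range 9 _ _ (n % 9) hc9, pv_set_map_range]
      apply List.map_congr_left
      intro c hcr
      have hcc : c < 9 := by simpa using hcr
      by_cases hce : c = n % 9
      · rw [if_pos hce, hce,
            show [PySem.Int.toChars (ilst.getD n 0)] = [ilst.getD n 0].map PySem.Int.toChars
              from rfl, ← List.map_append]
        congr 1
        rw [show min n ilst.length = n from by omega,
            show min (n+1) ilst.length = n+1 from by omega]
        exact pv_col_advance ilst n (n % 9) 0 rfl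
      · rw [if_neg hce, pv_col_skip n c (n % 9) ilst.length rfl hcc hce hm']
    · -- colv
      rw [pv_getD_map_range 9 _ _ (n % 9) hc9, pv_set_map_range]
      apply List.map_congr_left
      intro c hcr
      have hcc : c < 9 := by simpa using hcr
      by_cases hce : c = n % 9
      · rw [if_pos hce, hce]
        exact pv_col_advance cs n (n % 9) '?' rfl
      · rw [if_neg hce, show (n + 1 - c + 8)/9 = (n - c + 8)/9 from by omega]
  · -- n ≥ len(ilst), row chunk completes
    dsimp only
    have hm' : ilst.length ≤ n := by
      have : ¬ ((n : Int) < (ilst.length : Int)) := hm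
      omega
    have h8' : n % 9 = 8 := by exact_mod_cast h8
    congr 1
    · rw [show (n+1)/9 = n/9 + 1 from by omega, List.range_succ, List.map_append,
          List.map_singleton, pv_update_append_singleton]
      have hK : (ilst.drop (9*(n/9))).take (n - 9*(n/9)) = (ilst.drop (9*(n/9))).take 9 := by
        rw [pv_chunk_stall ilst (9*(n/9)) n (by omega)]
        congr 1
        omega
      have hV : (cs.drop (9*(n/9))).take (n - 9*(n/9)) ++ [cs.getD n '?']
          = (cs.drop (9*(n/9))).take 9 := by
        rw [pv_chunk_snoc cs (9*(n/9)) n '?' hq hn]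
        congr 1
        omega
      congr 1
      · simp only [pvRowEntry, pvKey]
        rw [hK]
      · simp only [pvRowEntry]
        rw [hV]
    · rw [show 9*((n+1)/9) = n+1 from by omega]
      simp
    · rw [show 9*((n+1)/9) = n+1 from by omega]
      simp
    · rw [show min (n+1) ilst.length = min n ilst.length from by omega]
    · rw [pv_getD_map_range 9 _ _ (n % 9) hc9, pv_set_map_range]
      apply List.map_congr_left
      intro c hcr
      have hcc : c < 9 := by simpa using hcr
      by_cases hce : c = n % 9
      · rw [if_pos hce, hce]
        exact pv_col_advance cs n (n % 9) '?' rfl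
      · rw [if_neg hce, show (n + 1 - c + 8)/9 = (n - c + 8)/9 from by omega]
  · -- n < len(ilst), row chunk not complete
    dsimp only
    have hm' : n < ilst.length := by exact_mod_cast hm
    have h8' : ¬ n % 9 = 8 := fun h => h8 (by exact_mod_cast h)
    congr 1
    · rw [show (n+1)/9 = n/9 from by omega]
    · rw [show (n+1)/9 = n/9 from by omega,
          show [PySem.Int.toChars (ilst.getD n 0)] = [ilst.getD n 0].map PySem.Int.toChars
            from rfl, ← List.map_append, pv_chunk_snoc ilst (9*(n/9)) n 0 hq hm']
    · rw [show (n+1)/9 = n/9 from by omega, pv_chunk_snoc cs (9*(n/9)) n '?' hq hn]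
    · rw [pv_getD_map_range 9 _ _ (n % 9) hc9, pv_set_map_range]
      apply List.map_congr_left
      intro c hcr
      have hcc : c < 9 := by simpa using hcr
      by_cases hce : c = n % 9
      · rw [if_pos hce, hce,
            show [PySem.Int.toChars (ilst.getD n 0)] = [ilst.getD n 0].map PySem.Int.toChars
              from rfl, ← List.map_append]
        congr 1
        rw [show min n ilst.length = n from by omega,
            show min (n+1) ilst.length = n+1 from by omega]
        exact pv_col_advance ilst n (n % 9) 0 rfl
      · rw [if_neg hce, pv_col_skip n c (n % 9) ilst.length rfl hcc hce hm']
    · rw [pv_getD_map_range 9 _ _ (n % 9) hc9, pv_set_map_range]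
      apply List.map_congr_left
      intro c hcr
      have hcc : c < 9 := by simpa using hcr
      by_cases hce : c = n % 9
      · rw [if_pos hce, hce]
        exact pv_col_advance cs n (n % 9) '?' rfl
      · rw [if_neg hce, show (n + 1 - c + 8)/9 = (n - c + 8)/9 from by omega]
  · -- n ≥ len(ilst), row chunk not complete
    dsimp only
    have hm' : ilst.length ≤ n := by
      have : ¬ ((n : Int) < (ilst.length : Int)) := hm
      omega
    have h8' : ¬ n % 9 = 8 := fun h => h8 (by exact_mod_cast h)
    congr 1
    · rw [show (n+1)/9 = n/9 from by omega]
    · rw [show (n+1)/9 = n/9 from by omega, pv_chunk_stall ilst (9*(n/9)) n (by omega)]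
    · rw [show (n+1)/9 = n/9 from by omega, pv_chunk_snoc cs (9*(n/9)) n '?' hq hn]
    · rw [show min (n+1) ilst.length = min n ilst.length from by omega]
    · rw [pv_getD_map_range 9 _ _ (n % 9) hc9, pv_set_map_range]
      apply List.map_congr_left
      intro c hcr
      have hcc : c < 9 := by simpa using hcr
      by_cases hce : c = n % 9
      · rw [if_pos hce, hce]
        exact pv_col_advance cs n (n % 9) '?' rfl
      · rw [if_neg hce, show (n + 1 - c + 8)/9 = (n - c + 8)/9 from by omega]

theorem pv_pass_inv (cs : List Char) (ilst : List Int) (n : Nat) (hn : n ≤ cs.length) :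
    (List.range n).foldl (fun st p => pvStepB cs ilst st ((p : Nat) : Int))
        (pvSt.mk PySem.Dict.empty [] [] [[], [], [], [], [], [], [], [], []]
          [[], [], [], [], [], [], [], [], []])
      = pvStN cs ilst n := by
  induction n with
  | zero =>
    have hz : ∀ c : Nat, (min 0 ilst.length - c + 8) / 9 = 0 := fun c => by omega
    have hz2 : ∀ c : Nat, (0 - c + 8) / 9 = 0 := fun c => by omega
    simp only [List.range_zero, List.foldl_nil, pvStN, hz, hz2, List.range_zero, List.map_nil,
      Nat.zero_div, Nat.mul_zero, Nat.sub_zero, List.take_zero, List.drop_zero]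
    rfl
  | succ n ih =>
    rw [List.range_succ, List.foldl_append, ih (by omega), List.foldl_cons, List.foldl_nil,
        pv_stepB_succ cs ilst n (by omega)]

theorem pv_passB_eq (cs : List Char) (ilst : List Int) :
    pvPassB cs ilst = pvStN cs ilst cs.length := by
  unfold pvPassB
  rw [pv_range0, List.foldl_map]
  exact pv_pass_inv cs ilst cs.length (by omega)

theorem pv_colsOutB_eq (cs : List Char) (ilst : List Int) :
    pvColsOutB (pvStN cs ilst cs.length)
      = (pvStN cs ilst cs.length).d.update (pvColPairs cs ilst) := by
  have hcolk : (pvStN cs ilst cs.length).colk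
      = (List.range 9).map (fun c => ((List.range ((min cs.length ilst.length - c + 8)/9)).map
          (fun k => ilst.getD (c + 9*k) 0)).map PySem.Int.toChars) := rfl
  have hcolv : (pvStN cs ilst cs.length).colv
      = (List.range 9).map (fun c => (List.range ((cs.length - c + 8)/9)).map
          (fun k => cs.getD (c + 9*k) '?')) := rfl
  unfold pvColsOutB pvColPairs pvKey
  have h09 : PySem.List.pyRange 0 9 1 = (List.range 9).map (fun i => ((i : Nat) : Int)) := by decide
  rw [h09, List.foldl_map]
  simp only [PySem.Dict.update]
  rw [List.foldl_map]
  apply PySem.List.foldl_congr_mem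
  intro d c hc
  have hc9 : c < 9 := by simpa using hc
  rw [Int.toNat_natCast, hcolk, hcolv,
      pv_getD_map_range 9 _ _ c hc9, pv_getD_map_range 9 _ _ c hc9]

theorem pv_bands_inv (ilst : List Int) (n : Nat) :
    (List.range n).foldl (fun bs t => bs.set (t % 3)
        (bs.getD (t % 3) [] ++ (ilst.drop (3*t)).take 3)) [[], [], []]
      = [pvBand ilst 0 n, pvBand ilst 1 n, pvBand ilst 2 n] := by
  induction n with
  | zero => rfl
  | succ n ih =>
    rw [List.range_succ, List.foldl_append, ih, List.foldl_cons, List.foldl_nil]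
    have hb : ∀ j, j = n % 3 → pvBand ilst j (n+1) = pvBand ilst j n ++ (ilst.drop (3*n)).take 3 := by
      intro j hj
      unfold pvBand
      have e1 : (n + 1 - j + 2)/3 = (n - j + 2)/3 + 1 := by omega
      have e2 : j + 3 * ((n - j + 2)/3) = n := by omega
      rw [e1, List.range_succ, List.flatMap_append]
      simp [e2]
    have hs : ∀ j, j < 3 → j ≠ n % 3 → pvBand ilst j (n+1) = pvBand ilst j n := by
      intro j hj3 hne
      unfold pvBand
      have e : (n + 1 - j + 2)/3 = (n - j + 2)/3 := by omega
      rw [e]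
    have h3 : n % 3 = 0 ∨ n % 3 = 1 ∨ n % 3 = 2 := by omega
    rcases h3 with h | h | h
    · rw [h]
      simp only [List.getD_cons_zero, List.set_cons_zero]
      rw [hb 0 h.symm, hs 1 (by omega) (by omega), hs 2 (by omega) (by omega)]
    · rw [h]
      simp only [List.getD_cons_zero, List.getD_cons_succ, List.set_cons_zero, List.set_cons_succ]
      rw [hb 1 h.symm, hs 0 (by omega) (by omega), hs 2 (by omega) (by omega)]
    · rw [h]
      simp only [List.getD_cons_zero, List.getD_cons_succ, List.set_cons_zero, List.set_cons_succ]
      rw [hb 2 h.symm, hs 0 (by omega) (by omega), hs 1 (by omega) (by omega)]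

theorem pv_valsB_eq (cs : List Char) (ilst : List Int) :
    pvValsB cs ilst = pvVals cs ilst := by
  unfold pvValsB pvBandsB
  have hf3 : PySem.Int.floordiv (cs.length : Int) 3 = ((cs.length / 3 : Nat) : Int) := by
    exact_mod_cast PySem.Int.floordiv_natCast cs.length 3
  rw [hf3, pv_range0, List.foldl_map]
  rw [PySem.List.foldl_congr_mem _ _
      (fun bs t => bs.set (t % 3) (bs.getD (t % 3) [] ++ (ilst.drop (3*t)).take 3))
      [[], [], []] ?_]
  · rw [pv_bands_inv]
    simp only [List.getD_cons_zero, List.getD_cons_succ]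
    show _ = (List.range 3).flatMap (fun j => pvBand ilst j (cs.length / 3))
    rw [show List.range 3 = [0, 1, 2] from rfl]
    simp [List.flatMap_cons]
  · intro bs t ht
    have hmod : PySem.Int.mod ((t : Nat) : Int) 3 = ((t % 3 : Nat) : Int) := by
      exact_mod_cast PySem.Int.mod_natCast t 3
    have c1 : (3 : Int) * (t : Int) = ((3 * t : Nat) : Int) := by push_cast; ring
    have c2 : ((3 * t : Nat) : Int) + 3 = ((3 * t + 3 : Nat) : Int) := by push_cast; ring
    rw [hmod, Int.toNat_natCast, c1, c2, PySem.List.slice_natCast]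
    have e : 3 * t + 3 - 3 * t = 3 := by omega
    rw [e]

theorem pv_sqB_eq (cs : List Char) (ilst : List Int) (d : PySem.Dict String String) :
    pvSqB cs ilst d = d.update (pvSqPairs cs ilst) := by
  unfold pvSqB pvSqPairs pvKey
  rw [pv_valsB_eq]
  have hf : PySem.Int.floordiv (cs.length : Int) 9 = ((cs.length / 9 : Nat) : Int) := by
    exact_mod_cast PySem.Int.floordiv_natCast cs.length 9
  have h0 : PySem.List.pyRange 0 ((cs.length / 9 : Nat) : Int) 1
      = (List.range (cs.length / 9)).map (fun i => ((i : Nat) : Int)) := by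
    have h := pv_rangeNat 0 (cs.length / 9) 1 (by norm_num)
    have hcnt : (cs.length / 9 - 0 + (1 - 1)) / 1 = cs.length / 9 := by omega
    rw [hcnt] at h
    simpa using h
  rw [hf, h0]
  simp only [PySem.Dict.update]
  rw [List.foldl_map, List.foldl_map]
  apply PySem.List.foldl_congr_mem
  intro d b hb
  have c1 : (9 : Int) * (b : Int) = ((9 * b : Nat) : Int) := by push_cast; ring
  have c2 : ((9 * b : Nat) : Int) + 9 = ((9 * b + 9 : Nat) : Int) := by push_cast; ring
  rw [c1, c2, PySem.List.slice_natCast]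
  have e2 : 9 * b + 9 - 9 * b = 9 := by omega
  rw [e2]

-- ===== VERDICT (by name: the statement is the Claim_ definition above) =====
theorem getAllArraysDict_spec : Claim_equal_getAllArraysDict := by
  intro datastr ilst _ _
  unfold Spec_getAllArraysDict getAllArraysDict getAllArraysDict_alt
  rw [pv_rowsA_eq, pv_colsA_eq, pv_squaresA_eq, pv_passB_eq, pv_colsOutB_eq, pv_sqB_eq,
      pv_update_built, pv_update_built, pv_update_built]
  rfl
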